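-- pv_equiv track=rewrite | github.com/MrJc01/crompressor-ia | codebooks/gerar_codebook.py | gerar_codigos_dna
-- ===== SOURCE A (Python) =====
-- from itertools import product
--
-- DNA_ALPHABET = ['A', 'T', 'C', 'G']
--
-- def gerar_codigos_dna(quantidade):
--     """
--     Gera códigos DNA únicos com propriedade Huffman-like:
--     códigos mais curtos são atribuídos primeiro (= mais frequentes).
--
--     Reserva:
--     - Prefixo '@@' para escape literal
--     - Códigos começando com 2+ caracteres
--     """
--     codigos = []
--     tamanho = 2  # Mínimo 2 chars para evitar ambiguidade
--
--     while len(codigos) < quantidade: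
--         for combo in product(DNA_ALPHABET, repeat=tamanho):
--             codigo = ''.join(combo)
--             codigos.append(codigo)
--             if len(codigos) >= quantidade:
--                 break
--         tamanho += 1
--
--     return codigos[:quantidade]
-- ===== SOURCE B (Python) =====
-- def _dna_char(d):
--     if d == 0:
--         return 'A'
--     if d == 1:
--         return 'T'
--     if d == 2:
--         return 'C'
--     return 'G'
--
--
-- def _codigo(off, tamanho):
--     # build the code arithmetically from the offset's base-4 digits (MSB first)
--     s = ''
--     for _ in range(tamanho):
--         s = _dna_char(off % 4) + s
--         off //= 4
--     return s
--
--
-- def gerar_codigos_dna(quantidade):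
--     codigos = []
--     tamanho = 2
--     restante = quantidade
--     while restante > 0:
--         n = min(restante, 4 ** tamanho)
--         for off in range(n):
--             codigos.append(_codigo(off, tamanho))
--         restante -= n
--         tamanho += 1
--     return codigos
-- ===== Notes on version B (the rewrite author's own statement) =====
-- stated objective: alternative
-- what changed: B replaces A's itertools.product enumeration of all DNA tuples plus append-and-break and a final slice by arithmetic generation: per length block it computes each code directly from its offset's base-4 digits (most significant first), appending exactly min(remaining, 4**tamanho) codes, so no combinatorial enumeration object and no slicing are used.
import Mathlib
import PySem

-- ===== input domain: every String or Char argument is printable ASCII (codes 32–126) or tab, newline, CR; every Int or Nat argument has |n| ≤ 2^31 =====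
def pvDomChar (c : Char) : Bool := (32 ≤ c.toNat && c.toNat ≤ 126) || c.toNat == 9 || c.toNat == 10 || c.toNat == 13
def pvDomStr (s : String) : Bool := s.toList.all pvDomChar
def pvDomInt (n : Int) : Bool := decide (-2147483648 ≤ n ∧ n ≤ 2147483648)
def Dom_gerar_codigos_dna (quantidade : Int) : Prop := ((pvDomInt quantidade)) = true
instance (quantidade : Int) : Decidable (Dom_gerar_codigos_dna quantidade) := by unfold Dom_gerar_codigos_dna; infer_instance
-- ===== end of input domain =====

-- B replaces A's itertools.product enumeration (+ final slice) by arithmetic base-4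
-- digit extraction per offset within each length block (objective: alternative decomposition).

-- ===== PORT A =====
def pvDNA : List Char := ['A', 'T', 'C', 'G']

-- itertools.product(DNA_ALPHABET, repeat=n): first component varies slowest
def pvProd : Nat → List (List Char)
  | 0 => [[]]
  | n + 1 => pvDNA.flatMap (fun c => (pvProd n).map (fun l => c :: l))

-- the inner 'for combo in product(...)' loop with its break
def pvInner (quantidade : Int) : List String → List String → List String
  | [], codigos => codigos
  | c :: rest, codigos =>
      let codigos2 := codigos ++ [c]
      if (codigos2.length : Int) ≥ quantidade then codigos2
      else pvInner quantidade rest codigos2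

theorem pvInner_le (q : Int) : ∀ (combos codigos : List String),
    codigos.length ≤ (pvInner q combos codigos).length := by
  intro combos
  induction combos with
  | nil => intro codigos; simp [pvInner]
  | cons c rest ih =>
      intro codigos
      simp only [pvInner]
      split
      · simp
      · have := ih (codigos ++ [c])
        simp at this
        omega

theorem pvInner_lt (q : Int) (combos codigos : List String) (h : combos ≠ []) :
    codigos.length < (pvInner q combos codigos).length := by
  cases combos with
  | nil => exact absurd rfl h
  | cons c rest =>
      simp only [pvInner]
      split
      · simp
      · have := pvInner_le q rest (codigos ++ [c])
        simp at this
        omega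

theorem pvProd_length : ∀ n, (pvProd n).length = 4 ^ n := by
  intro n
  induction n with
  | zero => rfl
  | succ n ih => simp [pvProd, pvDNA, ih]; try ring

-- the outer while loop
def pvOuter (quantidade : Int) (codigos : List String) (tamanho : Nat) : List String :=
  if h : (codigos.length : Int) < quantidade then
    pvOuter quantidade
      (pvInner quantidade ((pvProd tamanho).map (fun l => String.mk l)) codigos) (tamanho + 1)
  else codigos
termination_by (quantidade - codigos.length).toNat
decreasing_by
  have hne : (pvProd tamanho).map (fun l => String.mk l) ≠ [] := by
    have hl := pvProd_length tamanho
    intro hcon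
    have h0 : (pvProd tamanho).length = 0 := by
      simpa using congrArg List.length hcon
    rw [hl] at h0
    exact absurd h0 (by positivity)
  have := pvInner_lt quantidade ((pvProd tamanho).map (fun l => String.mk l)) codigos hne
  omega

def gerar_codigos_dna (quantidade : Int) : List String :=
  PySem.List.slice (pvOuter quantidade [] 2) none (some quantidade)

-- ===== PORT B =====
def pvDnaChar (d : Nat) : Char :=
  if d = 0 then 'A' else if d = 1 then 'T' else if d = 2 then 'C' else 'G'

-- the 'for _ in range(tamanho)' loop of _codigo, prepending digits
def pvCodigoAux : Nat → Nat → List Char → List Char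
  | 0, _, s => s
  | t + 1, off, s => pvCodigoAux t (off / 4) (pvDnaChar (off % 4) :: s)

def pvCodigo (off tamanho : Nat) : String := String.mk (pvCodigoAux tamanho off [])

-- the 'while restante > 0' loop
def pvAltLoop (restante : Int) (codigos : List String) (tamanho : Nat) : List String :=
  if restante > 0 then
    let n : Int := min restante ((4 : Int) ^ tamanho)
    pvAltLoop (restante - n) (codigos ++ (List.range n.toNat).map (fun off => pvCodigo off tamanho))
      (tamanho + 1)
  else codigos
termination_by restante.toNat
decreasing_by
  have : (1 : Int) ≤ (4 : Int) ^ tamanho := one_le_pow₀ (by norm_num)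
  omega

def gerar_codigos_dna_alt (quantidade : Int) : List String := pvAltLoop quantidade [] 2

-- ===== PRECONDITION & SPEC =====
def Spec_gerar_codigos_dna (quantidade : Int) (out : List String) : Prop := out = gerar_codigos_dna_alt quantidade
instance (quantidade : Int) (out : List String) : Decidable (Spec_gerar_codigos_dna quantidade out) := by unfold Spec_gerar_codigos_dna; infer_instance

-- ===== CLAIM (what is proved, stated in full; the proofs are below) =====
def Claim_equal_gerar_codigos_dna : Prop := ∀ (quantidade : Int), Dom_gerar_codigos_dna quantidade → Spec_gerar_codigos_dna quantidade (gerar_codigos_dna quantidade)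

-- ===== LEMMAS AND PROOFS =====

theorem pvCodigoAux_append : ∀ (t off : Nat) (s : List Char),
    pvCodigoAux t off s = pvCodigoAux t off [] ++ s := by
  intro t
  induction t with
  | zero => intro off s; simp [pvCodigoAux]
  | succ t ih =>
      intro off s
      simp only [pvCodigoAux]
      rw [ih (off / 4) (pvDnaChar (off % 4) :: s), ih (off / 4) [pvDnaChar (off % 4)]]
      simp

-- base-4 digit expansion versus splitting off the most significant digit
theorem pvCodigoAux_split : ∀ (t d r : Nat), d < 4 → r < 4 ^ t →
    pvCodigoAux (t + 1) (d * 4 ^ t + r) [] = pvDnaChar d :: pvCodigoAux t r [] := by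
  intro t
  induction t with
  | zero =>
      intro d r hd hr
      interval_cases r
      simp [pvCodigoAux, Nat.mod_eq_of_lt hd, Nat.div_eq_of_lt hd]
  | succ t ih =>
      intro d r hd hr
      have hdiv : (d * 4 ^ (t + 1) + r) / 4 = d * 4 ^ t + r / 4 := by
        rw [pow_succ, show d * (4 ^ t * 4) + r = r + d * 4 ^ t * 4 by ring,
          Nat.add_mul_div_right _ _ (by norm_num : (0:Nat) < 4)]
        omega
      have hmod : (d * 4 ^ (t + 1) + r) % 4 = r % 4 := by
        rw [pow_succ]
        rw [show d * (4 ^ t * 4) + r = r + d * 4 ^ t * 4 by ring]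
        simp [Nat.add_mul_mod_self_right]
      show pvCodigoAux (t + 1) ((d * 4 ^ (t + 1) + r) / 4)
          [pvDnaChar ((d * 4 ^ (t + 1) + r) % 4)] = _
      rw [hdiv, hmod, pvCodigoAux_append]
      have hr4 : r / 4 < 4 ^ t := by
        rw [pow_succ] at hr
        omega
      rw [ih d (r / 4) hd hr4]
      have hrhs : pvCodigoAux (t + 1) r [] = pvCodigoAux t (r / 4) [] ++ [pvDnaChar (r % 4)] := by
        show pvCodigoAux t (r / 4) [pvDnaChar (r % 4)] = _
        rw [pvCodigoAux_append]
      rw [hrhs]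
      simp

theorem range_split4 (m : Nat) : List.range (4 * m) =
    ((List.range m).map (fun r => 0 * m + r)) ++ ((List.range m).map (fun r => 1 * m + r))
      ++ ((List.range m).map (fun r => 2 * m + r)) ++ ((List.range m).map (fun r => 3 * m + r)) := by
  have h : 4 * m = m + (m + (m + m)) := by ring
  rw [h, List.range_add, List.range_add, List.range_add]
  simp only [List.map_append, List.map_map, List.append_assoc]
  congr 1
  · simp
  congr 1
  · apply List.map_congr_left; intro r _; simp [Function.comp]; try omega
  congr 1
  · apply List.map_congr_left; intro r _; simp [Function.comp]; try omega
  · apply List.map_congr_left; intro r _; simp [Function.comp]; try omega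

theorem pvProd_eq : ∀ t, pvProd t = (List.range (4 ^ t)).map (fun off => pvCodigoAux t off []) := by
  intro t
  induction t with
  | zero => rfl
  | succ t ih =>
      have hblock : ∀ d : Nat, d < 4 →
          ((List.range (4 ^ t)).map (fun r => d * 4 ^ t + r)).map
              (fun off => pvCodigoAux (t + 1) off []) =
            (pvProd t).map (fun l => pvDnaChar d :: l) := by
        intro d hd
        rw [ih, List.map_map, List.map_map]
        apply List.map_congr_left
        intro r hr
        have hr' : r < 4 ^ t := List.mem_range.mp hr
        simp [Function.comp, pvCodigoAux_split t d r hd hr']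
      have h41 : (4 : Nat) ^ (t + 1) = 4 * 4 ^ t := by ring
      rw [h41, range_split4]
      simp only [List.map_append]
      rw [hblock 0 (by norm_num), hblock 1 (by norm_num), hblock 2 (by norm_num),
        hblock 3 (by norm_num)]
      show pvDNA.flatMap (fun c => (pvProd t).map (fun l => c :: l)) = _
      simp [pvDNA, pvDnaChar]

-- the inner loop appends exactly the needed prefix of the combos
theorem pvInner_eq (q : Int) : ∀ (combos codigos : List String), (codigos.length : Int) < q →
    pvInner q combos codigos = codigos ++ combos.take (q - codigos.length).toNat := by
  intro combos
  induction combos with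
  | nil => intro codigos _; simp [pvInner]
  | cons c rest ih =>
      intro codigos h
      simp only [pvInner]
      split
      · rename_i hge
        have hlen : ((codigos ++ [c]).length : Int) = codigos.length + 1 := by simp
        have : (q - codigos.length).toNat = 1 := by omega
        rw [this]
        simp
      · rename_i hlt
        push_neg at hlt
        have hlen : ((codigos ++ [c]).length : Int) = codigos.length + 1 := by simp
        rw [ih (codigos ++ [c]) (by omega)]
        have : (q - ((codigos ++ [c]).length : Int)).toNat + 1 = (q - codigos.length).toNat := by
          simp only [hlen]; omega
        rw [List.append_assoc]
        congr 1
        rw [show (q - (codigos.length : Int)).toNat = (q - ((codigos ++ [c]).length : Int)).toNat + 1 by omega]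
        simp

theorem pvOuter_eq_alt : ∀ (m : Nat) (q : Int) (codigos : List String) (t : Nat),
    (q - codigos.length).toNat ≤ m →
    pvOuter q codigos t = pvAltLoop (q - codigos.length) codigos t := by
  intro m
  induction m with
  | zero =>
      intro q codigos t hm
      have hq : ¬ ((codigos.length : Int) < q) := by omega
      rw [pvOuter, pvAltLoop]
      simp only [dif_neg hq, if_neg (by omega : ¬ (q - (codigos.length : Int) > 0))]
  | succ m ih =>
      intro q codigos t hm
      by_cases hq : (codigos.length : Int) < q
      · rw [pvOuter, pvAltLoop]
        simp only [dif_pos hq, if_pos (by omega : q - (codigos.length : Int) > 0)]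
        set r : Int := q - codigos.length with hr
        have hrpos : 0 < r := by omega
        have hk : 1 ≤ (4 : Nat) ^ t := Nat.one_le_pow _ _ (by norm_num)
        have hcast : ((4 : Int) ^ t) = (((4 : Nat) ^ t : Nat) : Int) := by push_cast; ring
        have hcombos : (pvProd t).map (fun l => String.mk l) =
            (List.range (4 ^ t)).map (fun off => pvCodigo off t) := by
          rw [pvProd_eq, List.map_map]; rfl
        have hn : (min r ((4 : Int) ^ t)).toNat = min r.toNat ((4 : Nat) ^ t) := by
          rw [hcast]; omega
        have htake : pvInner q ((pvProd t).map (fun l => String.mk l)) codigos =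
            codigos ++ (List.range ((min r ((4 : Int) ^ t)).toNat)).map (fun off => pvCodigo off t) := by
          rw [pvInner_eq q _ codigos hq, hcombos, ← hr, ← List.map_take, List.take_range, hn]
        rw [htake]
        have hlen2 : (((codigos ++ (List.range ((min r ((4 : Int) ^ t)).toNat)).map
            (fun off => pvCodigo off t)).length : Int)) = codigos.length + (min r ((4:Int) ^ t)) := by
          simp only [List.length_append, List.length_map, List.length_range]
          rw [hcast]
          omega
        have hrec := ih q (codigos ++ (List.range ((min r ((4 : Int) ^ t)).toNat)).map
            (fun off => pvCodigo off t)) (t + 1) (by rw [hlen2, hcast]; omega)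
        rw [hrec, hlen2]
        congr 1
        omega
      · rw [pvOuter, pvAltLoop]
        simp only [dif_neg hq, if_neg (by omega : ¬ (q - (codigos.length : Int) > 0))]

theorem pvAltLoop_length : ∀ (m : Nat) (r : Int) (codigos : List String) (t : Nat),
    r.toNat ≤ m → (pvAltLoop r codigos t).length = codigos.length + r.toNat := by
  intro m
  induction m with
  | zero =>
      intro r codigos t hm
      rw [pvAltLoop]
      simp only [if_neg (by omega : ¬ (r > 0))]
      omega
  | succ m ih =>
      intro r codigos t hm
      by_cases hr : r > 0
      · rw [pvAltLoop]
        simp only [if_pos hr]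
        have h1 : (1 : Int) ≤ (4 : Int) ^ t := one_le_pow₀ (by norm_num)
        rw [ih (r - min r ((4:Int) ^ t)) _ (t + 1) (by omega)]
        simp only [List.length_append, List.length_map, List.length_range]
        omega
      · rw [pvAltLoop]
        simp only [if_neg hr]
        omega

-- ===== VERDICT (by name: the statement is the Claim_ definition above) =====
theorem gerar_codigos_dna_spec : Claim_equal_gerar_codigos_dna := by
  intro q _
  show gerar_codigos_dna q = gerar_codigos_dna_alt q
  unfold gerar_codigos_dna gerar_codigos_dna_alt
  have houter : pvOuter q [] 2 = pvAltLoop q [] 2 := by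
    have := pvOuter_eq_alt q.toNat q [] 2 (by simp)
    simpa using this
  rw [houter]
  by_cases hq : 0 < q
  · have hlen : (pvAltLoop q [] 2).length = q.toNat :=
      by simpa using pvAltLoop_length q.toNat q [] 2 (le_refl _)
    rw [show (some q) = some ((q.toNat : Nat) : Int) by rw [Int.toNat_of_nonneg (by omega)]]
    rw [PySem.List.slice_to_natCast]
    exact List.take_of_length_le (by omega)
  · have hempty : pvAltLoop q [] 2 = [] := by
      rw [pvAltLoop]; simp only [if_neg hq]
    rw [hempty]
    simp [PySem.List.slice]
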